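-- pv_equiv track=rewrite | github.com/Leslov/geek_PythonAlgoritm | hw7/ex3.py | get_mediane_2
-- ===== SOURCE A (Python) =====
-- def get_mediane_2(arr):
--     skip_ids = {}  # Срезаем часть массива, чтобы не выполнять лишние вычисления
--     for i in range(len(arr)):
--         if i in skip_ids:
--             continue
--         num = arr[i]
--         l, h = [], []
--         for j in range(len(arr)):
--             if arr[j] > num:
--                 h.append(j)
--             elif arr[j] < num:
--                 l.append(j)
--         # Допустим, медиана всегда делит массив на две равные части. Т.е. числа не повторяются
--         l_count, h_count = len(l), len(h)
--         if l_count == h_count: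
--             return num
--         elif l_count > h_count:
--             skip_ids = set(list(skip_ids) + h)
--         elif l_count < h_count:
--             skip_ids = set(list(skip_ids) + l)
-- ===== SOURCE B (Python) =====
-- def get_mediane_2(arr):
--     # Sort once; the only value that can split the array into equally many
--     # strictly-smaller and strictly-greater elements is sorted(arr)[(n-1)//2].
--     if not arr:
--         return None
--     s = sorted(arr)
--     m = s[(len(arr) - 1) // 2]
--     lo = sum(1 for x in arr if x < m)
--     hi = sum(1 for x in arr if x > m)
--     return m if lo == hi else None
-- ===== Notes on version B (the rewrite author's own statement) =====
-- stated objective: faster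
-- what changed: Replaces the quadratic scan with pairwise comparison counting and index-skip bookkeeping by a single sort: the only possible balanced value is sorted(arr)[(n-1)//2], so B sorts, picks that candidate and verifies its balance in one linear pass.
import Mathlib
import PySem

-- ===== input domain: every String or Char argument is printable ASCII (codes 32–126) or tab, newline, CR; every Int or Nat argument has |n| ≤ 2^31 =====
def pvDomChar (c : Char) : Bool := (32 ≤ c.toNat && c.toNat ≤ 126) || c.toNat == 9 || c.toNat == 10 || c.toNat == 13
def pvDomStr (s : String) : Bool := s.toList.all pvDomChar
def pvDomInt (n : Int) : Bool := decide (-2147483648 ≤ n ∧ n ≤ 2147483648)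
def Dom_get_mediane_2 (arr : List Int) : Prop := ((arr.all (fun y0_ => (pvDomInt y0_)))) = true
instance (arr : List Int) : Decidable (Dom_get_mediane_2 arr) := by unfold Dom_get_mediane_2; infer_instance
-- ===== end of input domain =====

-- B replaces A's quadratic skip-set scan by one sort plus a single verification pass (measured asymptotically faster).

-- ===== PORT A =====
-- inner 'for j in range(len(arr))' loop building the index lists (l, h);
-- arr[j] is ported as pyGetD with default 0: j comes from range(len(arr)), so it is always in range
def pvInner (arr : List Int) (num : Int) : List Int × List Int :=
  (PySem.List.pyRange 0 (arr.length : Int) 1).foldl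
    (fun lh j =>
      if num < PySem.List.pyGetD arr j 0 then (lh.1, lh.2 ++ [j])
      else if PySem.List.pyGetD arr j 0 < num then (lh.1 ++ [j], lh.2) else lh)
    ([], [])

-- outer 'for i in range(len(arr))' loop with the skip_ids set and early return;
-- 'skip_ids = set(list(skip_ids) + h)' is Set.ofList of the concatenation (the set is only used for membership)
def pvOuter (arr : List Int) : PySem.Set Int → List Int → Option Int
  | _, [] => none
  | skip, i :: rest =>
    if i ∈ skip then pvOuter arr skip rest
    else
      let num := PySem.List.pyGetD arr i 0
      let lh := pvInner arr num
      if lh.1.length = lh.2.length then some num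
      else if lh.2.length < lh.1.length then
        pvOuter arr (PySem.Set.ofList (skip ++ lh.2)) rest
      else if lh.1.length < lh.2.length then
        pvOuter arr (PySem.Set.ofList (skip ++ lh.1)) rest
      else pvOuter arr skip rest

def get_mediane_2 (arr : List Int) : Option Int :=
  pvOuter arr PySem.Set.empty (PySem.List.pyRange 0 (arr.length : Int) 1)

-- ===== PORT B =====
def get_mediane_2_alt (arr : List Int) : Option Int :=
  if arr.length = 0 then none
  else
    let s := PySem.List.sorted arr (fun x => x) false
    let m := PySem.List.pyGetD s (PySem.Int.floordiv ((arr.length : Int) - 1) 2) 0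
    let lo := arr.foldl (fun acc x => if x < m then acc + 1 else acc) (0 : Int)
    let hi := arr.foldl (fun acc x => if m < x then acc + 1 else acc) (0 : Int)
    if lo = hi then some m else none

-- ===== PRECONDITION & SPEC =====
def Spec_get_mediane_2 (arr : List Int) (out : Option Int) : Prop := out = get_mediane_2_alt arr
instance (arr : List Int) (out : Option Int) : Decidable (Spec_get_mediane_2 arr out) := by unfold Spec_get_mediane_2; infer_instance

-- ===== CLAIM (what is proved, stated in full; the proofs are below) =====
def Claim_equal_get_mediane_2 : Prop := ∀ (arr : List Int), Dom_get_mediane_2 arr → Spec_get_mediane_2 arr (get_mediane_2 arr)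

-- ===== LEMMAS AND PROOFS =====

-- counts of strictly smaller / strictly greater elements
def pvCl (arr : List Int) (v : Int) : Nat := arr.countP (fun y => decide (y < v))
def pvCh (arr : List Int) (v : Int) : Nat := arr.countP (fun y => decide (v < y))

-- the first element of arr (through the index list) whose two counts balance
def pvFirstBal (arr : List Int) : List Int → Option Int
  | [] => none
  | i :: rest =>
    if pvCl arr (PySem.List.pyGetD arr i 0) = pvCh arr (PySem.List.pyGetD arr i 0)
    then some (PySem.List.pyGetD arr i 0) else pvFirstBal arr rest

theorem pv_two_bins (p q : Int → Prop) [DecidablePred p] [DecidablePred q]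
    (L : List Int) (a b : List Int) :
    L.foldl (fun lh j => if p j then (lh.1, lh.2 ++ [j])
      else if q j then (lh.1 ++ [j], lh.2) else lh) (a, b)
    = (a ++ L.filter (fun j => decide (¬ p j ∧ q j)), b ++ L.filter (fun j => decide (p j))) := by
  induction L generalizing a b with
  | nil => simp
  | cons x t ih => by_cases hp : p x <;> by_cases hq : q x <;> simp [hp, hq, ih]

theorem pvInner_eq (arr : List Int) (num : Int) :
    pvInner arr num
    = ((PySem.List.pyRange 0 (arr.length : Int) 1).filter (fun j => decide (PySem.List.pyGetD arr j 0 < num)),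
       (PySem.List.pyRange 0 (arr.length : Int) 1).filter (fun j => decide (num < PySem.List.pyGetD arr j 0))) := by
  unfold pvInner
  rw [pv_two_bins (fun j => num < PySem.List.pyGetD arr j 0) (fun j => PySem.List.pyGetD arr j 0 < num)]
  simp only [List.nil_append]
  congr 1
  apply List.filter_congr
  intro j _
  simp only [decide_eq_decide]
  omega

theorem pv_countP_idx (arr : List Int) (p : Int → Bool) :
    (PySem.List.pyRange 0 (arr.length : Int) 1).countP (fun j => p (PySem.List.pyGetD arr j 0))
      = arr.countP p := by
  conv_rhs => rw [← PySem.List.map_pyGetD_pyRange_zero' arr 0, List.countP_map]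
  rfl

theorem pvInner_len1 (arr : List Int) (num : Int) :
    (pvInner arr num).1.length = pvCl arr num := by
  rw [pvInner_eq]
  show ((PySem.List.pyRange 0 (arr.length : Int) 1).filter _).length = _
  rw [← List.countP_eq_length_filter, pvCl, ← pv_countP_idx arr (fun y => decide (y < num))]

theorem pvInner_len2 (arr : List Int) (num : Int) :
    (pvInner arr num).2.length = pvCh arr num := by
  rw [pvInner_eq]
  show ((PySem.List.pyRange 0 (arr.length : Int) 1).filter _).length = _
  rw [← List.countP_eq_length_filter, pvCh, ← pv_countP_idx arr (fun y => decide (num < y))]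

theorem pvCl_mono (arr : List Int) {a b : Int} (h : a ≤ b) : pvCl arr a ≤ pvCl arr b :=
  List.countP_mono_left (fun y _ hy => by simp_all; omega)

theorem pvCh_anti (arr : List Int) {a b : Int} (h : a ≤ b) : pvCh arr b ≤ pvCh arr a :=
  List.countP_mono_left (fun y _ hy => by simp_all; omega)

-- every index the loop ever skips is unbalanced, so the loop finds the first balanced element
theorem pvOuter_spec (arr : List Int) (idxs : List Int) (skip : PySem.Set Int)
    (hskip : ∀ i ∈ skip, pvCl arr (PySem.List.pyGetD arr i 0) ≠ pvCh arr (PySem.List.pyGetD arr i 0)) :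
    pvOuter arr skip idxs = pvFirstBal arr idxs := by
  induction idxs generalizing skip with
  | nil => rfl
  | cons i rest ih =>
    rw [pvOuter, pvFirstBal]
    by_cases hmem : i ∈ skip
    · rw [if_pos hmem, if_neg (hskip i hmem), ih skip hskip]
    · rw [if_neg hmem]
      set num := PySem.List.pyGetD arr i 0 with hnum
      have h1 := pvInner_len1 arr num
      have h2 := pvInner_len2 arr num
      by_cases heq : (pvInner arr num).1.length = (pvInner arr num).2.length
      · rw [if_pos heq, if_pos (by rw [← h1, ← h2]; exact heq)]
      · have hbne : pvCl arr num ≠ pvCh arr num := fun hc => heq (by rw [h1, h2]; exact hc)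
        rw [if_neg heq, if_neg hbne]
        by_cases hgt : (pvInner arr num).2.length < (pvInner arr num).1.length
        · rw [if_pos hgt]
          apply ih
          intro i' hi'
          rw [PySem.Set.mem_ofList, List.mem_append] at hi'
          rcases hi' with h | h
          · exact hskip i' h
          · have hlt : num < PySem.List.pyGetD arr i' 0 := by
              rw [pvInner_eq] at h
              simp only [List.mem_filter, decide_eq_true_eq] at h
              exact h.2
            have hc1 := pvCl_mono arr (le_of_lt hlt)
            have hc2 := pvCh_anti arr (le_of_lt hlt)
            omega
        · rw [if_neg hgt,
            if_pos (show (pvInner arr num).1.length < (pvInner arr num).2.length by omega)]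
          apply ih
          intro i' hi'
          rw [PySem.Set.mem_ofList, List.mem_append] at hi'
          rcases hi' with h | h
          · exact hskip i' h
          · have hlt : PySem.List.pyGetD arr i' 0 < num := by
              rw [pvInner_eq] at h
              simp only [List.mem_filter, decide_eq_true_eq] at h
              exact h.2
            have hc1 := pvCl_mono arr (le_of_lt hlt)
            have hc2 := pvCh_anti arr (le_of_lt hlt)
            omega

theorem pvFirstBal_some (arr : List Int) (idxs : List Int) (v : Int)
    (h : pvFirstBal arr idxs = some v) :
    ∃ i ∈ idxs, PySem.List.pyGetD arr i 0 = v ∧ pvCl arr v = pvCh arr v := by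
  induction idxs with
  | nil => simp [pvFirstBal] at h
  | cons i rest ih =>
    rw [pvFirstBal] at h
    by_cases hb : pvCl arr (PySem.List.pyGetD arr i 0) = pvCh arr (PySem.List.pyGetD arr i 0)
    · rw [if_pos hb] at h
      exact ⟨i, List.mem_cons_self, by injection h with h'; subst h'; exact ⟨rfl, hb⟩⟩
    · rw [if_neg hb] at h
      obtain ⟨i', hi', hv⟩ := ih h
      exact ⟨i', List.mem_cons_of_mem _ hi', hv⟩

theorem pvFirstBal_none (arr : List Int) (idxs : List Int)
    (h : pvFirstBal arr idxs = none) :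
    ∀ i ∈ idxs, pvCl arr (PySem.List.pyGetD arr i 0) ≠ pvCh arr (PySem.List.pyGetD arr i 0) := by
  induction idxs with
  | nil => simp
  | cons i rest ih =>
    rw [pvFirstBal] at h
    by_cases hb : pvCl arr (PySem.List.pyGetD arr i 0) = pvCh arr (PySem.List.pyGetD arr i 0)
    · rw [if_pos hb] at h; exact absurd h (by simp)
    · rw [if_neg hb] at h
      intro j hj
      rcases List.mem_cons.mp hj with rfl | hj'
      · exact hb
      · exact ih h j hj'

-- counting trichotomy
theorem pv_tri (l : List Int) (v : Int) :
    l.countP (fun y => decide (y < v)) + l.countP (fun y => decide (y = v))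
      + l.countP (fun y => decide (v < y)) = l.length := by
  induction l with
  | nil => simp
  | cons x t ih =>
      rcases lt_trichotomy x v with h | h | h <;>
        simp [h, ne_of_gt, ne_of_lt, not_lt_of_gt] <;> omega

theorem pv_le_split (l : List Int) (v : Int) :
    l.countP (fun y => decide (y ≤ v))
      = l.countP (fun y => decide (y < v)) + l.countP (fun y => decide (y = v)) := by
  induction l with
  | nil => simp
  | cons x t ih =>
      rcases lt_trichotomy x v with h | h | h <;>
        simp [h, le_of_lt, ne_of_gt, ne_of_lt, not_le_of_gt] <;> omega

theorem pv_ge_split (l : List Int) (v : Int) :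
    l.countP (fun y => decide (v ≤ y))
      = l.countP (fun y => decide (y = v)) + l.countP (fun y => decide (v < y)) := by
  induction l with
  | nil => simp
  | cons x t ih =>
      rcases lt_trichotomy x v with h | h | h <;>
        simp [h, le_of_lt, ne_of_gt, ne_of_lt, not_le_of_gt] <;> omega

theorem pv_countP_le_drop (s : List Int) (p : Int → Bool) (i : Nat)
    (h : ∀ y ∈ s.drop i, ¬ p y = true) : s.countP p ≤ i := by
  conv_lhs => rw [← List.take_append_drop i s]
  rw [List.countP_append, List.countP_eq_zero.2 h, Nat.add_zero]
  calc (s.take i).countP p ≤ (s.take i).length := List.countP_le_length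
    _ ≤ i := by simp

theorem pv_countP_le_take (s : List Int) (p : Int → Bool) (i : Nat)
    (h : ∀ y ∈ s.take (i + 1), ¬ p y = true) : s.countP p ≤ s.length - 1 - i := by
  conv_lhs => rw [← List.take_append_drop (i + 1) s]
  rw [List.countP_append, List.countP_eq_zero.2 h, Nat.zero_add]
  calc (s.drop (i + 1)).countP p ≤ (s.drop (i + 1)).length := List.countP_le_length
    _ ≤ s.length - 1 - i := by simp; omega

-- sorted-position bounds
theorem pv_sorted_lt_le (s : List Int) (hs : s.Pairwise (· ≤ ·)) (i : Nat) (hi : i < s.length) :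
    s.countP (fun y => decide (y < s[i])) ≤ i := by
  apply pv_countP_le_drop
  intro y hy
  obtain ⟨j, hj, rfl⟩ := List.mem_iff_getElem.mp hy
  have hij : i + j < s.length := by simp at hj; omega
  rw [List.getElem_drop]
  have : s[i] ≤ s[i + j] := by
    rcases Nat.eq_zero_or_pos j with rfl | hpos
    · simp
    · exact List.pairwise_iff_getElem.mp hs i (i + j) hi hij (by omega)
  simp; omega

theorem pv_sorted_gt_le (s : List Int) (hs : s.Pairwise (· ≤ ·)) (i : Nat) (hi : i < s.length) :
    s.countP (fun y => decide (s[i] < y)) ≤ s.length - 1 - i := by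
  apply pv_countP_le_take
  intro y hy
  obtain ⟨j, hj, rfl⟩ := List.mem_iff_getElem.mp hy
  have hj2 : j < s.length := by simp at hj; omega
  rw [List.getElem_take]
  have hji : j ≤ i := by simp at hj; omega
  have : s[j] ≤ s[i] := by
    rcases Nat.eq_or_lt_of_le hji with rfl | hpos
    · simp
    · exact List.pairwise_iff_getElem.mp hs j i (by omega) hi hpos
  simp; omega

-- THE median lemma: any balanced element equals sorted(arr)[(n-1)/2]
theorem pv_median (arr : List Int) (x : Int) (hx : x ∈ arr)
    (hbal : pvCl arr x = pvCh arr x)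
    (hlt : (arr.length - 1) / 2 < (PySem.List.sorted arr (fun x => x) false).length) :
    x = (PySem.List.sorted arr (fun x => x) false)[(arr.length - 1) / 2] := by
  set s := PySem.List.sorted arr (fun x => x) false with hsdef
  have hperm : s.Perm arr := PySem.List.sorted_perm arr (fun x => x) false
  have hpw : s.Pairwise (· ≤ ·) := PySem.List.sorted_pairwise arr (fun x => x)
  have hlen : s.length = arr.length := by rw [hsdef, PySem.List.length_sorted]
  set mid := (arr.length - 1) / 2 with hmid
  set m := s[mid] with hm
  have hcl_m : arr.countP (fun y => decide (y < m)) ≤ mid := by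
    rw [← hperm.countP_eq]; exact pv_sorted_lt_le s hpw mid hlt
  have hch_m : arr.countP (fun y => decide (m < y)) ≤ arr.length - 1 - mid := by
    rw [← hperm.countP_eq, ← hlen]; exact pv_sorted_gt_le s hpw mid hlt
  have htri := pv_tri arr x
  have he : 0 < arr.countP (fun y => decide (y = x)) :=
    List.countP_pos_iff.mpr ⟨x, hx, by simp⟩
  rw [pvCl, pvCh] at hbal
  rcases lt_trichotomy x m with hlt' | heq | hlt'
  · exfalso
    have hsub : arr.countP (fun y => decide (y ≤ x)) ≤ arr.countP (fun y => decide (y < m)) :=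
      List.countP_mono_left (fun y _ hy => by simp_all; omega)
    rw [pv_le_split] at hsub
    omega
  · exact heq
  · exfalso
    have hsub : arr.countP (fun y => decide (x ≤ y)) ≤ arr.countP (fun y => decide (m < y)) :=
      List.countP_mono_left (fun y _ hy => by simp_all; omega)
    rw [pv_ge_split] at hsub
    omega

theorem pv_count_fold (arr : List Int) (p : Int → Prop) [DecidablePred p] (init : Int) :
    arr.foldl (fun acc x => if p x then acc + 1 else acc) init
      = init + (arr.countP (fun x => decide (p x)) : Int) := by
  induction arr generalizing init with
  | nil => simp
  | cons x t ih =>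
      by_cases h : p x
      · simp [h, ih]; ring
      · simp [h, ih]

-- B evaluated: the sorted middle element, returned iff balanced
theorem pv_alt_eq (arr : List Int) (hn : 0 < arr.length)
    (hlt : (arr.length - 1) / 2 < (PySem.List.sorted arr (fun x => x) false).length) :
    get_mediane_2_alt arr =
      (if pvCl arr ((PySem.List.sorted arr (fun x => x) false)[(arr.length - 1) / 2])
          = pvCh arr ((PySem.List.sorted arr (fun x => x) false)[(arr.length - 1) / 2])
       then some ((PySem.List.sorted arr (fun x => x) false)[(arr.length - 1) / 2]) else none) := by
  simp only [get_mediane_2_alt]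
  rw [if_neg (show ¬ (arr.length = 0) by omega)]
  have hcast : ((arr.length : Int) - 1) = ((arr.length - 1 : Nat) : Int) := by push_cast [hn]; omega
  have h2 : (2 : Int) = ((2 : Nat) : Int) := rfl
  rw [hcast, h2, PySem.Int.floordiv_natCast, PySem.List.pyGetD_natCast,
    List.getD_eq_getElem _ _ hlt]
  rw [pv_count_fold, pv_count_fold]
  simp only [Int.zero_add]
  rw [pvCl, pvCh]
  by_cases h : arr.countP (fun y => decide (y < (PySem.List.sorted arr (fun x => x) false)[(arr.length - 1) / 2]))
      = arr.countP (fun y => decide ((PySem.List.sorted arr (fun x => x) false)[(arr.length - 1) / 2] < y))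
  · rw [if_pos (by exact_mod_cast h), if_pos h]
  · rw [if_neg (fun hc => h (by exact_mod_cast hc)), if_neg h]

-- ===== VERDICT (by name: the statement is the Claim_ definition above) =====
theorem get_mediane_2_spec : Claim_equal_get_mediane_2 := by
  intro arr _
  unfold Spec_get_mediane_2 get_mediane_2
  rw [pvOuter_spec arr _ PySem.Set.empty (by intro i hi; simp [PySem.Set.empty] at hi)]
  have hmap := PySem.List.map_pyGetD_pyRange_zero' arr 0
  cases hres : pvFirstBal arr (PySem.List.pyRange 0 (arr.length : Int) 1) with
  | none =>
    have hall := pvFirstBal_none arr _ hres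
    by_cases hn : arr.length = 0
    · rw [get_mediane_2_alt, if_pos hn]
    · have hn' : 0 < arr.length := by omega
      have hlt : (arr.length - 1) / 2 < (PySem.List.sorted arr (fun x => x) false).length := by
        rw [PySem.List.length_sorted]; omega
      set m := (PySem.List.sorted arr (fun x => x) false)[(arr.length - 1) / 2] with hm
      have hmem : m ∈ arr :=
        (PySem.List.sorted_perm arr (fun x => x) false).mem_iff.mp (List.getElem_mem hlt)
      rw [← hmap] at hmem
      obtain ⟨i, hi, hgi⟩ := List.mem_map.mp hmem
      rw [pv_alt_eq arr hn' hlt, if_neg (by rw [← hm, ← hgi]; exact hall i hi)]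
  | some v =>
    obtain ⟨i, hi, hgi, hbal⟩ := pvFirstBal_some arr _ v hres
    have hv : v ∈ arr := by
      rw [← hmap]; exact List.mem_map.mpr ⟨i, hi, hgi⟩
    have hn' : 0 < arr.length := List.length_pos_of_mem hv
    have hlt : (arr.length - 1) / 2 < (PySem.List.sorted arr (fun x => x) false).length := by
      rw [PySem.List.length_sorted]; omega
    have hmed := pv_median arr v hv hbal hlt
    rw [pv_alt_eq arr hn' hlt, if_pos (by rw [← hmed]; exact hbal), ← hmed]
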